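-- pv_equiv track=rewrite | github.com/oleksandr-medviediev/campus_2018_python | Volodymyr_Kuksa/2/FindTheOddInt.py | find_odd2
-- ===== SOURCE A (Python) =====
-- def find_odd2(array):
--     """
--     Return the first element that occurs an odd number of times in the array.
--
--     :param array: the array that is being searched for elements that occur odd number of times.
--     :type array: iterable.
--
--     :return: the first element that occurs an odd number of times in the array or None if such element is absent
--
--     Implemented via map().
--     """
--     occurrences = list(map(lambda element: array.count(element), array))
--
--     result = None
--
--     for i in range(len(array)):
--
--         is_odd = occurrences[i] % 2
--
--         if is_odd:
--
--             result = array[i]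
--
--     return result
-- ===== SOURCE B (Python) =====
-- def find_odd2(array):
--     parity = set()
--     for element in array:
--         if element in parity:
--             parity.discard(element)
--         else:
--             parity.add(element)
--     for element in reversed(array):
--         if element in parity:
--             return element
--     return None
-- ===== Notes on version B (the rewrite author's own statement) =====
-- stated objective: faster
-- what changed: Replaces the per-element array.count scan (quadratic) and the forward overwrite loop over indices by a single parity-toggling set pass plus a reverse early-returning scan for the first element in the set.
import Mathlib
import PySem

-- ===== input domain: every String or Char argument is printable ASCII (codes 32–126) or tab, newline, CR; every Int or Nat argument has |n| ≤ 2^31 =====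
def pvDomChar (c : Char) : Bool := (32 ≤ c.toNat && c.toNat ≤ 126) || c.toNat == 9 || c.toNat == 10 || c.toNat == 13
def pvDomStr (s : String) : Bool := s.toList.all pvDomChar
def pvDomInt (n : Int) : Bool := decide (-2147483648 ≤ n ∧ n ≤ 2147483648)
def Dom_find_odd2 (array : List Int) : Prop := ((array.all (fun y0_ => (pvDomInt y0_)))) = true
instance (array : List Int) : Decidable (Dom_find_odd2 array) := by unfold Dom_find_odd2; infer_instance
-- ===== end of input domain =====

-- B replaces A's quadratic count-per-element pass and forward overwrite loop by a linear
-- parity-toggling set pass plus a reverse early-returning scan (objective: faster).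

-- ===== PORT A =====
-- literal port: occurrences = list(map(lambda e: array.count(e), array));
-- for i in range(len(array)): if occurrences[i] % 2: result = array[i]
def find_odd2 (array : List Int) : Option Int :=
  let occurrences : List Int := array.map (fun element => (PySem.List.count array element : Int))
  (PySem.List.pyRange 0 (array.length : Int) 1).foldl
    (fun result i =>
      if PySem.Int.mod (PySem.List.pyGetD occurrences i 0) 2 ≠ 0 then
        some (PySem.List.pyGetD array i 0)
      else result)
    none

-- ===== PORT B =====
def find_odd2_alt (array : List Int) : Option Int :=
  let parity : PySem.Set Int :=
    array.foldl
      (fun s element =>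
        if PySem.Set.contains s element then PySem.Set.discard s element
        else PySem.Set.add s element)
      PySem.Set.empty
  array.reverse.find? (fun element => PySem.Set.contains parity element)

-- ===== PRECONDITION & SPEC =====
def Spec_find_odd2 (array : List Int) (out : Option Int) : Prop := out = find_odd2_alt array
instance (array : List Int) (out : Option Int) : Decidable (Spec_find_odd2 array out) := by unfold Spec_find_odd2; infer_instance

-- ===== CLAIM (what is proved, stated in full; the proofs are below) =====
def Claim_equal_find_odd2 : Prop := ∀ (array : List Int), Dom_find_odd2 array → Spec_find_odd2 array (find_odd2 array)

-- ===== LEMMAS AND PROOFS =====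

-- membership in the parity-toggled set = odd occurrence count, generalized over the start set
lemma toggle_mem (xs : List Int) (s : PySem.Set Int) (x : Int) :
    (x ∈ xs.foldl
      (fun s element =>
        if PySem.Set.contains s element then PySem.Set.discard s element
        else PySem.Set.add s element) s)
    ↔ ((x ∈ s) ↔ ¬ (xs.count x % 2 = 1)) := by
  induction xs generalizing s with
  | nil => simp
  | cons a t ih =>
    simp only [List.foldl_cons, ih]
    by_cases hax : x = a
    · subst hax
      by_cases hs : PySem.Set.contains s x
      · rw [PySem.Set.contains_iff] at hs
        simp only [List.count_cons_self]
        simp [hs, PySem.Set.mem_discard]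
        omega
      · have hs' : x ∉ s := by
          intro h; exact hs ((PySem.Set.contains_iff s x).mpr h)
        simp only [List.count_cons_self]
        simp [hs']
        omega
    · have hne : a ≠ x := fun h => hax h.symm
      have hc : (a :: t).count x = t.count x := by
        simp [hne]
      rw [hc]
      by_cases hs : PySem.Set.contains s a
      · rw [PySem.Set.contains_iff] at hs
        simp [hs, PySem.Set.mem_discard, hax]
      · have hs' : a ∉ s := by
          intro h; exact hs ((PySem.Set.contains_iff s a).mpr h)
        simp [hs', hax]

-- the forward overwrite loop = find-first on the reversed list
lemma foldl_overwrite_eq_find (p : Int → Bool) (xs : List Int) (r : Option Int) :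
    xs.foldl (fun acc x => if p x then some x else acc) r
      = ((xs.reverse.find? p).elim r some) := by
  induction xs generalizing r with
  | nil => simp
  | cons a t ih =>
    simp only [List.foldl_cons, ih, List.reverse_cons, List.find?_append]
    cases h : t.reverse.find? p with
    | some y => simp
    | none => cases hp : p a <;> simp [hp]

def oddP (array : List Int) : Int → Bool := fun x => decide (List.count x array % 2 = 1)

lemma A_eq_find (array : List Int) :
    find_odd2 array = ((array.reverse.find? (oddP array)).elim none some) := by
  show (PySem.List.pyRange 0 (array.length : Int) 1).foldl
      (fun result i =>
        if PySem.Int.mod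
            (PySem.List.pyGetD (array.map (fun element => (PySem.List.count array element : Int))) i 0) 2 ≠ 0 then
          some (PySem.List.pyGetD array i 0)
        else result)
      none = _
  have hcongr : (PySem.List.pyRange 0 (array.length : Int) 1).foldl
      (fun result i =>
        if PySem.Int.mod
            (PySem.List.pyGetD (array.map (fun element => (PySem.List.count array element : Int))) i 0) 2 ≠ 0 then
          some (PySem.List.pyGetD array i 0)
        else result)
      none
    = (PySem.List.pyRange 0 (array.length : Int) 1).foldl
      (fun result i =>
        if oddP array (PySem.List.pyGetD array i 0) then some (PySem.List.pyGetD array i 0) else result)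
      none := by
    apply PySem.List.foldl_congr_mem
    intro acc i hi
    rw [PySem.List.mem_pyRange_one] at hi
    have hlt : i.toNat < array.length := by omega
    have h1 : PySem.List.pyGetD (array.map (fun element => (PySem.List.count array element : Int))) i 0
        = (PySem.List.count array (array[i.toNat]) : Int) := by
      rw [PySem.List.pyGetD_eq_getElem _ 0 hi.1 (by simpa using hi.2)]
      simp
    have h2 : PySem.List.pyGetD array i 0 = array[i.toNat] :=
      PySem.List.pyGetD_eq_getElem _ 0 hi.1 hi.2
    rw [h1, h2]
    have hmod : PySem.Int.mod ((PySem.List.count array (array[i.toNat]) : Nat) : Int) 2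
        = (((PySem.List.count array (array[i.toNat])) % 2 : Nat) : Int) := by
      exact_mod_cast PySem.Int.mod_natCast _ 2
    rw [hmod, PySem.List.count_eq]
    rcases Nat.mod_two_eq_zero_or_one (List.count (array[i.toNat]) array) with h | h <;>
      simp [oddP, h]
  rw [hcongr,
    PySem.List.foldl_pyRange_zero_pyGetD' array 0
      (fun result x => if oddP array x then some x else result) none,
    foldl_overwrite_eq_find]

lemma B_eq_find (array : List Int) :
    find_odd2_alt array = array.reverse.find? (oddP array) := by
  show array.reverse.find? (fun element =>
      PySem.Set.contains
        (array.foldl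
          (fun s element =>
            if PySem.Set.contains s element then PySem.Set.discard s element
            else PySem.Set.add s element) PySem.Set.empty) element)
    = array.reverse.find? (oddP array)
  congr 1
  funext e
  have hmem := toggle_mem array PySem.Set.empty e
  simp only [PySem.Set.empty, List.not_mem_nil, false_iff, not_not] at hmem
  by_cases h : List.count e array % 2 = 1
  · have : e ∈ array.foldl
      (fun s element =>
        if PySem.Set.contains s element then PySem.Set.discard s element
        else PySem.Set.add s element) PySem.Set.empty := hmem.mpr h
    simp [PySem.Set.empty] at this
    simp [oddP, h, PySem.Set.empty, this]
  · have : e ∉ array.foldl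
      (fun s element =>
        if PySem.Set.contains s element then PySem.Set.discard s element
        else PySem.Set.add s element) PySem.Set.empty := fun hm => h (hmem.mp hm)
    simp [PySem.Set.empty] at this
    simp [oddP, h, PySem.Set.empty, this]

-- ===== VERDICT (by name: the statement is the Claim_ definition above) =====
theorem find_odd2_spec : Claim_equal_find_odd2 := by
  intro array _
  show find_odd2 array = find_odd2_alt array
  rw [A_eq_find, B_eq_find]
  cases array.reverse.find? (oddP array) <;> rfl
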